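-- pv_equiv track=rewrite | github.com/RISHASUN001/LegacyModernization_Testing_SKILLS | skills_backup_pre_mate_sync_fix_20260416_114124/_common/skill_logic.py | infer_flows_from_urls
-- ===== SOURCE A (Python) =====
-- def infer_flows_from_urls(urls: list[str]) -> list[str]:
--     flows: list[str] = []
--     for url in urls:
--         lower = url.lower()
--         if "load" in lower:
--             flows.append("Load module data")
--         elif "view" in lower or "list" in lower:
--             flows.append("View module records")
--         elif "save" in lower or "update" in lower:
--             flows.append("Save or update module data")
--         elif "submit" in lower:
--             flows.append("Submit workflow for downstream processing")
--         elif "validate" in lower: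
--             flows.append("Validate input and business rules")
--         elif "delete" in lower:
--             flows.append("Delete module records")
--     if not flows:
--         flows = ["Load module data", "Edit module data", "Submit module workflow"]
--     return dedupe(flows)
--
-- def dedupe(values: list[str]) -> list[str]:
--     seen: set[str] = set()
--     out: list[str] = []
--     for value in values:
--         if value not in seen:
--             seen.add(value)
--             out.append(value)
--     return out
-- ===== SOURCE B (Python) =====
-- FLOWS = [
--     "Load module data",
--     "View module records",
--     "Save or update module data",
--     "Submit workflow for downstream processing",
--     "Validate input and business rules",
--     "Delete module records",
-- ]
-- KEYWORDS = [
--     ["load"],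
--     ["view", "list"],
--     ["save", "update"],
--     ["submit"],
--     ["validate"],
--     ["delete"],
-- ]
--
--
-- def _match(lower: str):
--     for k, kws in enumerate(KEYWORDS):
--         if any(kw in lower for kw in kws):
--             return k
--     return None
--
--
-- def infer_flows_from_urls(urls: list[str]) -> list[str]:
--     # first[k] = index of the first url classified under rule k (None if never)
--     first: list = [None] * len(FLOWS)
--     i = 0
--     for url in urls:
--         k = _match(url.lower())
--         if k is not None and first[k] is None:
--             first[k] = i
--         i += 1
--     pairs = [(idx, k) for k, idx in enumerate(first) if idx is not None]
--     present = sorted(pairs, key=lambda p: p[0])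
--     if not present:
--         return ["Load module data", "Edit module data", "Submit module workflow"]
--     return [FLOWS[k] for _, k in present]
-- ===== Notes on version B (the rewrite author's own statement) =====
-- stated objective: alternative
-- what changed: Instead of appending each url's flow to a list and deduplicating with a seen-set, B records in a 6-slot table the index of the first url matching each rule, then sorts the occupied slots by that index and emits their flow names; no running output list and no seen-set exist.
import Mathlib
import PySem

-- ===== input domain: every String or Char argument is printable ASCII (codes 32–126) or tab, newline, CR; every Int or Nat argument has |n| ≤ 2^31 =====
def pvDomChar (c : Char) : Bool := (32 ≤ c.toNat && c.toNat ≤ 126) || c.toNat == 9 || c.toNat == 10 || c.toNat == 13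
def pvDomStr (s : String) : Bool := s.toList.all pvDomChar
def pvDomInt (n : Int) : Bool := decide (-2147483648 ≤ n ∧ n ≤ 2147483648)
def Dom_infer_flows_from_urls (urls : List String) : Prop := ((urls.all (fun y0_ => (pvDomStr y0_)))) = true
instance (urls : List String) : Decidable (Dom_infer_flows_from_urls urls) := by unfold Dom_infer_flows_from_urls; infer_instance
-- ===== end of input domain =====

-- B replaces A's append-then-seen-set-dedupe by a first-occurrence index table per rule,
-- sorted by index at the end; alternative decomposition, same cost.

-- ===== PORT A =====
-- A's helper 'dedupe' (seen-set + output list loop), transliterated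
def dedupeA (values : List String) : List String :=
  (values.foldl
    (fun (st : PySem.Set String × List String) value =>
      if ¬ PySem.Set.contains st.1 value then
        (PySem.Set.add st.1 value, st.2 ++ [value])
      else st)
    (PySem.Set.empty, [])).2

def infer_flows_from_urls (urls : List String) : List String :=
  let flows := urls.foldl
    (fun (flows : List String) url =>
      let lower := PySem.Str.lower url
      if PySem.Str.isIn "load" lower then flows ++ ["Load module data"]
      else if PySem.Str.isIn "view" lower || PySem.Str.isIn "list" lower then
        flows ++ ["View module records"]
      else if PySem.Str.isIn "save" lower || PySem.Str.isIn "update" lower then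
        flows ++ ["Save or update module data"]
      else if PySem.Str.isIn "submit" lower then
        flows ++ ["Submit workflow for downstream processing"]
      else if PySem.Str.isIn "validate" lower then
        flows ++ ["Validate input and business rules"]
      else if PySem.Str.isIn "delete" lower then
        flows ++ ["Delete module records"]
      else flows)
    []
  let flows := if flows = [] then
      ["Load module data", "Edit module data", "Submit module workflow"]
    else flows
  dedupeA flows

-- ===== PORT B =====
def pvFLOWS : List String :=
  [ "Load module data",
    "View module records",
    "Save or update module data",
    "Submit workflow for downstream processing",
    "Validate input and business rules",
    "Delete module records" ]

def pvKEYWORDS : List (List String) :=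
  [ ["load"],
    ["view", "list"],
    ["save", "update"],
    ["submit"],
    ["validate"],
    ["delete"] ]

-- Source B helper _match: 'for k, kws in enumerate(KEYWORDS): if any(...): return k' (k is the
-- running enumerate counter)
def pvMatch (k : Nat) (rules : List (List String)) (lower : String) : Option Nat :=
  match rules with
  | [] => none
  | kws :: rest =>
    if kws.any (fun kw => PySem.Str.isIn kw lower) then some k
    else pvMatch (k + 1) rest lower

-- Source B main loop: fill the first-occurrence table (i is the running url index)
def pvFill (i : Nat) (urls : List String) (first : List (Option Nat)) : List (Option Nat) :=
  match urls with
  | [] => first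
  | url :: rest =>
    let first' :=
      match pvMatch 0 pvKEYWORDS (PySem.Str.lower url) with
      | some k => if first.getD k none = none then first.set k (some i) else first
      | none => first
    pvFill (i + 1) rest first'

-- Source B comprehension '[(idx, k) for k, idx in enumerate(first) if idx is not None]'
def pvPairs (k : Nat) (first : List (Option Nat)) : List (Nat × Nat) :=
  match first with
  | [] => []
  | none :: rest => pvPairs (k + 1) rest
  | some idx :: rest => (idx, k) :: pvPairs (k + 1) rest

def infer_flows_from_urls_alt (urls : List String) : List String :=
  let first := pvFill 0 urls (List.replicate 6 none)
  let present := PySem.List.sorted (pvPairs 0 first) (fun p => p.1) false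
  if present = [] then ["Load module data", "Edit module data", "Submit module workflow"]
  else present.map (fun p => pvFLOWS.getD p.2 "")   -- FLOWS[k]: exact, every recorded k < 6

-- ===== PRECONDITION & SPEC =====
def Spec_infer_flows_from_urls (urls : List String) (out : List String) : Prop := out = infer_flows_from_urls_alt urls
instance (urls : List String) (out : List String) : Decidable (Spec_infer_flows_from_urls urls out) := by unfold Spec_infer_flows_from_urls; infer_instance

-- ===== CLAIM (what is proved, stated in full; the proofs are below) =====
def Claim_equal_infer_flows_from_urls : Prop := ∀ (urls : List String), Dom_infer_flows_from_urls urls → Spec_infer_flows_from_urls urls (infer_flows_from_urls urls)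

-- ===== LEMMAS AND PROOFS =====

-- the classified rule index of one url (shared characterisation of both loops)
def pvCls (url : String) : Option Nat := pvMatch 0 pvKEYWORDS (PySem.Str.lower url)

-- A's per-url step appends FLOWS[k] exactly when pvCls url = some k
theorem stepA_eq (flows : List String) (url : String) :
    (let lower := PySem.Str.lower url
      if PySem.Str.isIn "load" lower then flows ++ ["Load module data"]
      else if PySem.Str.isIn "view" lower || PySem.Str.isIn "list" lower then
        flows ++ ["View module records"]
      else if PySem.Str.isIn "save" lower || PySem.Str.isIn "update" lower then
        flows ++ ["Save or update module data"]
      else if PySem.Str.isIn "submit" lower then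
        flows ++ ["Submit workflow for downstream processing"]
      else if PySem.Str.isIn "validate" lower then
        flows ++ ["Validate input and business rules"]
      else if PySem.Str.isIn "delete" lower then
        flows ++ ["Delete module records"]
      else flows)
    = (match pvCls url with
       | some k => flows ++ [pvFLOWS.getD k ""]
       | none => flows) := by
  simp only [pvCls, pvMatch, pvKEYWORDS, List.any_cons, List.any_nil, Bool.or_false]
  split_ifs <;> rfl

theorem pvCls_lt (url : String) (k : Nat) (h : pvCls url = some k) : k < 6 := by
  simp only [pvCls, pvMatch, pvKEYWORDS] at h
  split_ifs at h <;> (try simp_all) <;> omega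

-- A's flows list is map FLOWS of the classified indices
def pvKs (urls : List String) : List Nat := urls.filterMap pvCls

theorem flowsA_eq (urls : List String) (acc : List String) :
    urls.foldl
      (fun (flows : List String) url =>
        let lower := PySem.Str.lower url
        if PySem.Str.isIn "load" lower then flows ++ ["Load module data"]
        else if PySem.Str.isIn "view" lower || PySem.Str.isIn "list" lower then
          flows ++ ["View module records"]
        else if PySem.Str.isIn "save" lower || PySem.Str.isIn "update" lower then
          flows ++ ["Save or update module data"]
        else if PySem.Str.isIn "submit" lower then
          flows ++ ["Submit workflow for downstream processing"]
        else if PySem.Str.isIn "validate" lower then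
          flows ++ ["Validate input and business rules"]
        else if PySem.Str.isIn "delete" lower then
          flows ++ ["Delete module records"]
        else flows)
      acc
    = acc ++ (pvKs urls).map (fun k => pvFLOWS.getD k "") := by
  induction urls generalizing acc with
  | nil => simp [pvKs]
  | cons u rest ih =>
    rw [List.foldl_cons, stepA_eq acc u]
    cases h : pvCls u with
    | none =>
      rw [ih acc]
      simp [pvKs, h]
    | some k =>
      rw [ih (acc ++ [pvFLOWS.getD k ""])]
      simp [pvKs, h]

-- A's seen-set dedupe, with seen = out as state invariant
theorem dedupeA_loop (l : List String) (s : PySem.Set String) :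
    (l.foldl
      (fun (st : PySem.Set String × List String) value =>
        if ¬ PySem.Set.contains st.1 value then
          (PySem.Set.add st.1 value, st.2 ++ [value])
        else st)
      (s, s)).2 = l.foldl PySem.Set.add s := by
  induction l generalizing s with
  | nil => rfl
  | cons x xs ih =>
    by_cases h : x ∈ s
    · simpa [PySem.Set.add, PySem.Set.contains_eq_listContains, h] using ih s
    · simpa [PySem.Set.add, PySem.Set.contains_eq_listContains, h] using ih (s ++ [x])

theorem dedupeA_eq_dedup (l : List String) : dedupeA l = PySem.List.dedup l := by
  have := dedupeA_loop l PySem.Set.empty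
  simpa [dedupeA, PySem.Set.empty, PySem.List.dedup_eq_ofList, PySem.Set.ofList_eq_foldl] using this

-- dedup commutes with an injective-on-the-list map
theorem dedup_map_inj {α β : Type} [DecidableEq α] [DecidableEq β] (f : α → β) (l : List α)
    (hinj : ∀ a ∈ l, ∀ b ∈ l, f a = f b → a = b) :
    PySem.List.dedup (l.map f) = (PySem.List.dedup l).map f := by
  induction l using List.reverseRecOn with
  | nil => rfl
  | append_singleton l x ih =>
    have hl : ∀ a ∈ l, ∀ b ∈ l, f a = f b → a = b := by
      intro a ha b hb; exact hinj a (by simp [ha]) b (by simp [hb])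
    have hfx : f x ∈ l.map f ↔ x ∈ l := by
      constructor
      · rintro hm
        obtain ⟨a, ha, hfa⟩ := List.mem_map.1 hm
        have := hinj a (by simp [ha]) x (by simp) hfa
        simpa [this] using ha
      · intro h; exact List.mem_map_of_mem h
    simp only [List.map_append, List.map_cons, List.map_nil,
      PySem.List.dedup_eq_ofList, PySem.Set.ofList_eq_foldl, List.foldl_append, List.foldl_cons,
      List.foldl_nil]
    rw [← PySem.Set.ofList_eq_foldl, ← PySem.Set.ofList_eq_foldl,
      ← PySem.List.dedup_eq_ofList, ← PySem.List.dedup_eq_ofList, ih hl]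
    by_cases hx : x ∈ l
    · simp [PySem.Set.add, PySem.Set.contains_eq_listContains, hx]
      exact ⟨x, hx, rfl⟩
    · have hfxn : ¬ f x ∈ l.map f := by simpa [hfx] using hx
      simp [PySem.Set.add, PySem.Set.contains_eq_listContains, hx]
      intro a ha hfa
      exact hfxn (hfa ▸ List.mem_map_of_mem ha)

-- pvPairs of a fresh set k is a permutation of the old pairs plus (i, j + k)
theorem pvPairs_set (first : List (Option Nat)) :
    ∀ (j k i : Nat), k < first.length → first.getD k none = none →
    (pvPairs j (first.set k (some i))).Perm ((i, j + k) :: pvPairs j first) := by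
  induction first with
  | nil => intro j k i hk; exact absurd hk (by simp)
  | cons x rest ih =>
    intro j k i hk hnone
    cases k with
    | zero =>
      have hx : x = none := by simpa using hnone
      subst hx
      simp [pvPairs, List.set]
    | succ k =>
      have h1 : rest.getD k none = none := by simpa using hnone
      have h2 : k < rest.length := by simpa using hk
      have hIH := ih (j + 1) k i h2 h1
      cases x with
      | none =>
        simpa [pvPairs, List.set, Nat.add_assoc, Nat.add_comm 1 k] using hIH
      | some idx =>
        refine List.Perm.trans ?_ (List.Perm.swap _ _ _)
        simpa [pvPairs, List.set, Nat.add_assoc, Nat.add_comm 1 k] using hIH.cons (idx, j)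

-- getD on a set at another position
theorem getD_set_ne {α : Type} (l : List (Option α)) (k k' : Nat) (v : Option α) (h : k' ≠ k) :
    (l.set k v).getD k' none = l.getD k' none := by
  rcases Nat.lt_or_ge k' l.length with h' | h'
  · simp [List.getD_eq_getElem?_getD, List.getElem?_set_ne (by omega : k ≠ k')]
  · simp [List.getD_eq_getElem?_getD, List.getElem?_eq_none (by simpa using h'),
      List.getElem?_eq_none (l := l.set k v) (by simpa using h')]

theorem getD_set_self {α : Type} (l : List (Option α)) (k : Nat) (v : Option α)
    (h : k < l.length) : (l.set k v).getD k none = v := by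
  simp [List.getD_eq_getElem?_getD, List.getElem?_set_self (by simpa using h)]

-- MAIN INVARIANT: B's fill loop grows the sorted first-occurrence listing exactly as
-- Python's ordered set-insert (dedupe) grows the list of distinct classified indices.
theorem fill_main (urls : List String) :
    ∀ (i : Nat) (first : List (Option Nat)) (ps : List (Nat × Nat)),
    first.length = 6 →
    PySem.List.sorted (pvPairs 0 first) (fun p => p.1) false = ps →
    ps.Pairwise (fun p q => p.1 < q.1) →
    (∀ p ∈ ps, p.1 < i) →
    (∀ k, k < 6 → (first.getD k none = none ↔ ¬ k ∈ ps.map Prod.snd)) →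
    (PySem.List.sorted (pvPairs 0 (pvFill i urls first)) (fun p => p.1) false).map Prod.snd
      = (pvKs urls).foldl PySem.Set.add (ps.map Prod.snd) := by
  induction urls with
  | nil =>
    intro i first ps _ hsort _ _ _
    simp [pvFill, pvKs, hsort]
  | cons url rest ih =>
    intro i first ps hlen hsort hpw hlt hiff
    have hks : pvKs (url :: rest) =
        (match pvCls url with | some k => k :: pvKs rest | none => pvKs rest) := by
      cases h : pvCls url <;> simp [pvKs, h]
    cases hcls : pvCls url with
    | none =>
      rw [hks]
      simp only [hcls]
      have : pvFill i (url :: rest) first = pvFill (i + 1) rest first := by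
        simp [pvFill, pvCls] at hcls ⊢
        rw [hcls]
      rw [this]
      exact ih (i + 1) first ps hlen hsort hpw (fun p hp => Nat.lt_succ_of_lt (hlt p hp)) hiff
    | some k =>
      have hk6 : k < 6 := pvCls_lt url k hcls
      rw [hks]
      simp only [hcls]
      by_cases hset : first.getD k none = none
      · -- fresh rule: record i, ps grows by (i, k)
        have hkn : ¬ k ∈ ps.map Prod.snd := (hiff k hk6).1 hset
        have hset' : first[k]?.getD none = none := by
          simpa [List.getD_eq_getElem?_getD] using hset
        have hfill : pvFill i (url :: rest) first
            = pvFill (i + 1) rest (first.set k (some i)) := by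
          simp [pvFill, pvCls] at hcls ⊢
          rw [hcls]
          simp [hset']
        rw [hfill]
        have hperm0 : (pvPairs 0 first).Perm ps :=
          (hsort ▸ PySem.List.sorted_perm (pvPairs 0 first) (fun p => p.1) false).symm
        -- pvPairs of the updated table permutes ps ++ [(i, k)]
        have hperm : (pvPairs 0 (first.set k (some i))).Perm (ps ++ [(i, k)]) := by
          have h1 := pvPairs_set first 0 k i (hlen ▸ hk6) hset
          have h2 : ((i, 0 + k) :: pvPairs 0 first).Perm (ps ++ [(i, k)]) := by
            simpa using List.Perm.trans (List.Perm.cons (i, k) hperm0)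
              (List.perm_append_singleton (i, k) ps).symm
          exact h1.trans h2
        have hpw' : (ps ++ [(i, k)]).Pairwise (fun p q : Nat × Nat => p.1 < q.1) := by
          rw [List.pairwise_append]
          exact ⟨hpw, List.pairwise_singleton _ _, fun p hp q hq => by
            simp at hq; subst hq; exact hlt p hp⟩
        have hsort' : PySem.List.sorted (pvPairs 0 (first.set k (some i))) (fun p => p.1) false
            = ps ++ [(i, k)] :=
          PySem.List.sorted_eq_of_perm_of_pairwise_lt _ _ _ hperm.symm hpw'
        have hiff' : ∀ k', k' < 6 →
            ((first.set k (some i)).getD k' none = none ↔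
              ¬ k' ∈ (ps ++ [(i, k)]).map Prod.snd) := by
          intro k' hk'
          by_cases he : k' = k
          · subst he
            rw [getD_set_self first k' (some i) (hlen ▸ hk')]
            simp
          · rw [getD_set_ne first k k' (some i) he]
            rw [hiff k' hk']
            simp [he]
        have := ih (i + 1) (first.set k (some i)) (ps ++ [(i, k)])
          (by simp [hlen]) hsort' hpw'
          (by intro p hp
              rcases List.mem_append.1 hp with h | h
              · exact Nat.lt_succ_of_lt (hlt p h)
              · simp at h; subst h; exact Nat.lt_succ_self i)
          hiff'
        rw [this]
        have hadd : PySem.Set.add (ps.map Prod.snd) k = ps.map Prod.snd ++ [k] := by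
          simp [PySem.Set.add, PySem.Set.contains_eq_listContains, hkn]
        rw [List.foldl_cons, hadd]
        simp
      · -- already recorded: table unchanged, k already in the dedup list
        have hkin : k ∈ ps.map Prod.snd := by
          by_contra hno
          exact hset ((hiff k hk6).2 hno)
        have hset' : ¬ first[k]?.getD none = none := by
          simpa [List.getD_eq_getElem?_getD] using hset
        have hfill : pvFill i (url :: rest) first = pvFill (i + 1) rest first := by
          simp [pvFill, pvCls] at hcls ⊢
          rw [hcls]
          simp [hset']
        rw [hfill]
        have hadd : PySem.Set.add (ps.map Prod.snd) k = ps.map Prod.snd := by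
          simp [PySem.Set.add, PySem.Set.contains_eq_listContains, hkin]
        rw [List.foldl_cons, hadd]
        exact ih (i + 1) first ps hlen hsort hpw (fun p hp => Nat.lt_succ_of_lt (hlt p hp)) hiff

-- FLOWS lookup is injective below 6
theorem pvFLOWS_inj : ∀ a < 6, ∀ b < 6, pvFLOWS.getD a "" = pvFLOWS.getD b "" → a = b := by
  decide

theorem pvKs_mem_lt (urls : List String) (k : Nat) (h : k ∈ pvKs urls) : k < 6 := by
  obtain ⟨u, _, hu⟩ := List.mem_filterMap.1 h
  exact pvCls_lt u k hu

theorem dedup_ne_nil {α : Type} [DecidableEq α] (l : List α) (h : l ≠ []) :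
    PySem.List.dedup l ≠ [] := by
  cases l with
  | nil => exact absurd rfl h
  | cons x xs =>
    intro hc
    have : x ∈ PySem.List.dedup (x :: xs) := (PySem.List.mem_dedup (x :: xs) x).2 (by simp)
    rw [hc] at this
    simp at this

-- ===== VERDICT (by name: the statement is the Claim_ definition above) =====
theorem infer_flows_from_urls_spec : Claim_equal_infer_flows_from_urls := by
  intro urls _
  unfold Spec_infer_flows_from_urls infer_flows_from_urls infer_flows_from_urls_alt
  rw [flowsA_eq urls [], dedupeA_eq_dedup]
  have hmain := fill_main urls 0 (List.replicate 6 none) [] (by simp) (by decide)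
    (List.Pairwise.nil) (by simp) (by decide)
  simp only [List.map_nil] at hmain
  rw [← PySem.Set.ofList_eq_foldl, ← PySem.List.dedup_eq_ofList] at hmain
  simp only [List.nil_append]
  by_cases hks : pvKs urls = []
  · have hA : (pvKs urls).map (fun k => pvFLOWS.getD k "") = [] := by simp [hks]
    have hB : PySem.List.sorted (pvPairs 0 (pvFill 0 urls (List.replicate 6 none)))
        (fun p => p.1) false = [] := by
      have h2 : (PySem.List.sorted (pvPairs 0 (pvFill 0 urls (List.replicate 6 none)))
          (fun p => p.1) false).map Prod.snd = [] := by rw [hmain, hks]; rfl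
      exact List.map_eq_nil_iff.1 h2
    rw [hA, hB]
    decide
  · have hA : (pvKs urls).map (fun k => pvFLOWS.getD k "") ≠ [] := by
      simpa [List.map_eq_nil_iff] using hks
    have hB : PySem.List.sorted (pvPairs 0 (pvFill 0 urls (List.replicate 6 none)))
        (fun p => p.1) false ≠ [] := by
      intro hc
      have : (PySem.List.sorted (pvPairs 0 (pvFill 0 urls (List.replicate 6 none)))
          (fun p => p.1) false).map Prod.snd = [] := by rw [hc]; rfl
      rw [hmain] at this
      exact dedup_ne_nil (pvKs urls) hks this
    rw [if_neg hA, if_neg hB]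
    have hinj : ∀ a ∈ pvKs urls, ∀ b ∈ pvKs urls,
        pvFLOWS.getD a "" = pvFLOWS.getD b "" → a = b := by
      intro a ha b hb
      exact pvFLOWS_inj a (pvKs_mem_lt urls a ha) b (pvKs_mem_lt urls b hb)
    rw [dedup_map_inj _ _ hinj, ← hmain]
    simp [List.map_map, Function.comp]
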